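-- pv_equiv track=rewrite | github.com/benleung/leetcode | easy/isomorphic-strings.py | format0
-- ===== SOURCE A (Python) =====
-- def format0(string):
--     ret = []
--     h = {}
--     cur = 0
--     for ch in string:
--         if h.get(ch) != None:
--             ret.append(str(h[ch]))
--         else:
--             h[ch] = cur
--             ret.append(str(cur))
--             cur += 1
--     return ret
-- ===== SOURCE B (Python) =====
-- def format0(string):
--     # rank of ch = number of distinct characters strictly before ch's first occurrence
--     return [str(len(set(string[:string.index(ch)]))) for ch in string]
-- ===== Notes on version B (the rewrite author's own statement) =====
-- stated objective: alternative
-- what changed: A's single stateful pass maintaining a dict and a running counter is replaced by a dict-free nested-scan formulation: each character's code is computed independently as the count of distinct characters in the prefix before its first occurrence (str.index + set of a slice), trading O(n) state for O(n^2) stateless per-character work.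
import Mathlib
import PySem

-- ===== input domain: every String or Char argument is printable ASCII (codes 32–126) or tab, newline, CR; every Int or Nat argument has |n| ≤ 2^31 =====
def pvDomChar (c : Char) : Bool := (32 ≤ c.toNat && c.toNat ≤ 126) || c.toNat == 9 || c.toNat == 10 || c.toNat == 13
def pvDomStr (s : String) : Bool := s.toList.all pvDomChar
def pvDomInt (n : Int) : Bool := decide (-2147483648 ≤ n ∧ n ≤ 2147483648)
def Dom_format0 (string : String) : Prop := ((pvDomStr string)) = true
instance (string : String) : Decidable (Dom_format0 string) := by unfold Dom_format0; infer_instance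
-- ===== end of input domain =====

-- B replaces A's single stateful pass (dict + running counter) by a dict-free nested-scan
-- formulation: each character's code is the count of distinct characters before its first
-- occurrence (objective: alternative; B is quadratic, not faster).

-- ===== PORT A =====
-- one loop step of A: dict hit → append stored rank; miss → record and append the counter, bump it
def format0Step (st : List String × PySem.Dict Char Int × Int) (ch : Char) :
    List String × PySem.Dict Char Int × Int :=
  match st.2.1.get? ch with                    -- h.get(ch) != None
  | some v => (st.1 ++ [PySem.Int.toStr v], st.2.1, st.2.2)
  | none   => (st.1 ++ [PySem.Int.toStr st.2.2], st.2.1.insert ch st.2.2, st.2.2 + 1)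

def format0 (string : String) : List String :=
  (string.toList.foldl format0Step ([], PySem.Dict.empty, 0)).1

-- ===== PORT B =====
def format0_alt (string : String) : List String :=
  -- [str(len(set(string[:string.index(ch)]))) for ch in string]
  -- string.index(ch) never raises here (ch is drawn from string), so '.getD 0' is exact
  -- (the default is unreachable); string[:j] with the nonnegative in-range j is 'take j'.
  string.toList.map (fun ch =>
    PySem.Int.toStr
      (((PySem.Set.ofList
          (string.toList.take ((PySem.List.index? string.toList ch).getD 0))).length : Int)))

-- ===== PRECONDITION & SPEC =====
def Spec_format0 (string : String) (out : List String) : Prop := out = format0_alt string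
instance (string : String) (out : List String) : Decidable (Spec_format0 string out) := by unfold Spec_format0; infer_instance

-- ===== CLAIM (what is proved, stated in full; the proofs are below) =====
def Claim_equal_format0 : Prop := ∀ (string : String), Dom_format0 string → Spec_format0 string (format0 string)

-- ===== LEMMAS AND PROOFS =====

-- the common reference value: the rank of c = its index in the first-occurrence dedup u
def rankStr (u : List Char) (c : Char) : String :=
  PySem.Int.toStr (((PySem.List.index? u c).getD 0 : Nat) : Int)

lemma index?_update_of_mem (s : PySem.Set Char) (l : List Char) {c : Char} (hc : c ∈ s) :
    PySem.List.index? (PySem.Set.update s l) c = PySem.List.index? s c := by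
  rw [PySem.Set.update_eq_append_filter]
  exact PySem.List.index?_append_of_mem _ hc

-- ===== A-side: A's fold equals the map of first-occurrence ranks =====
lemma aLoop (l : List Char) (ret : List String) (h : PySem.Dict Char Int) (s : List Char)
    (hs : s.Nodup) (hh : ∀ c, h.get? c = (PySem.List.index? s c).map (fun k : Nat => (k : Int))) :
    (l.foldl format0Step (ret, h, (s.length : Int))).1
      = ret ++ l.map (rankStr (PySem.Set.update s l)) := by
  induction l generalizing ret h s with
  | nil => simp [PySem.Set.update_nil]
  | cons c l ih =>
    rcases hc : PySem.List.index? s c with _ | k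
    · -- c not seen yet
      have hnm : c ∉ s := (PySem.List.index?_eq_none_iff s c).mp hc
      have hadd : PySem.Set.add s c = s ++ [c] := by
        simp [PySem.Set.add, PySem.Set.contains, hnm]
      have hs' : (s ++ [c]).Nodup := by
        simp [List.nodup_append, hs]
        exact fun a ha hac => hnm (hac ▸ ha)
      have hh' : ∀ x, (h.insert c (s.length : Int)).get? x
          = (PySem.List.index? (s ++ [c]) x).map (fun k : Nat => (k : Int)) := by
        intro x
        rw [PySem.Dict.get?_insert]
        by_cases hx : x = c
        · subst hx
          rw [PySem.List.index?_append_singleton_self s x hnm]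
          simp
        · rw [if_neg hx, hh x]
          by_cases hxs : x ∈ s
          · rw [PySem.List.index?_append_of_mem _ hxs]
          · rw [(PySem.List.index?_eq_none_iff s x).mpr hxs,
              (PySem.List.index?_eq_none_iff _ x).mpr (by simp [hxs, hx])]
      have hcur : (s.length : Int) + 1 = ((s ++ [c]).length : Int) := by simp
      have hstep : format0Step (ret, h, (s.length : Int)) c
          = (ret ++ [PySem.Int.toStr (s.length : Int)], h.insert c (s.length : Int),
             (s.length : Int) + 1) := by
        simp only [format0Step, hh c, hc, Option.map_none]
      have hupd : PySem.Set.update s (c :: l) = PySem.Set.update (s ++ [c]) l := by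
        rw [PySem.Set.update_cons, hadd]
      have hcm : c ∈ s ++ [c] := by simp
      have hhead : rankStr (PySem.Set.update (s ++ [c]) l) c = PySem.Int.toStr (s.length : Int) := by
        rw [rankStr, index?_update_of_mem _ _ hcm,
          PySem.List.index?_append_singleton_self s c hnm]
        rfl
      rw [List.foldl_cons, hstep, hcur, ih _ _ _ hs' hh', List.map_cons, hupd, hhead,
        List.append_assoc, List.singleton_append]
    · -- c already seen at index k
      have hmem : c ∈ s := (PySem.List.index?_isSome_iff s c).mp (by rw [hc]; rfl)
      have hadd : PySem.Set.add s c = s := by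
        simp [PySem.Set.add, PySem.Set.contains, hmem]
      have hstep : format0Step (ret, h, (s.length : Int)) c
          = (ret ++ [PySem.Int.toStr (k : Int)], h, (s.length : Int)) := by
        simp only [format0Step, hh c, hc, Option.map_some]
      have hupd : PySem.Set.update s (c :: l) = PySem.Set.update s l := by
        rw [PySem.Set.update_cons, hadd]
      have hhead : rankStr (PySem.Set.update s l) c = PySem.Int.toStr (k : Int) := by
        rw [rankStr, index?_update_of_mem _ _ hmem, hc]
        rfl
      rw [List.foldl_cons, hstep, ih _ _ _ hs hh, List.map_cons, hupd, hhead,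
        List.append_assoc, List.singleton_append]

lemma a_eq_rank (string : String) :
    format0 string = string.toList.map (rankStr (PySem.Set.ofList string.toList)) := by
  have h0 : ∀ c, (PySem.Dict.empty : PySem.Dict Char Int).get? c
      = (PySem.List.index? ([] : List Char) c).map (fun k : Nat => (k : Int)) := by
    intro c
    rw [(PySem.List.index?_eq_none_iff ([] : List Char) c).mpr (by simp), PySem.Dict.get?_empty]
    rfl
  have := aLoop string.toList [] PySem.Dict.empty [] (by simp) h0
  simpa [format0, PySem.Set.update_empty] using this

-- ===== B-side: the index of c in the dedup equals the distinct count of the prefix before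
-- c's first occurrence =====
lemma key (c : Char) (l : List Char) : ∀ (s : List Char) (j : Nat), s.Nodup → c ∉ s →
    PySem.List.index? l c = some j →
    PySem.List.index? (PySem.Set.update s l) c
      = some ((PySem.Set.update s (l.take j)).length) := by
  induction l with
  | nil =>
    intro s j _ _ hj
    rw [(PySem.List.index?_eq_none_iff ([] : List Char) c).mpr (by simp)] at hj
    exact absurd hj (by simp)
  | cons x t ih =>
    intro s j hs hcs hj
    by_cases hxc : x = c
    · subst hxc
      rw [PySem.List.index?_cons_self] at hj
      have hj0 : j = 0 := by injection hj with h; exact h.symm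
      subst hj0
      have hadd : PySem.Set.add s x = s ++ [x] := by
        simp [PySem.Set.add, PySem.Set.contains, hcs]
      rw [List.take_zero, PySem.Set.update_nil, PySem.Set.update_cons, hadd,
        index?_update_of_mem _ _ (by simp : x ∈ s ++ [x]),
        PySem.List.index?_append_singleton_self s x hcs]
    · rw [PySem.List.index?_cons_of_ne t hxc] at hj
      rcases hk : PySem.List.index? t c with _ | k
      · rw [hk] at hj; exact absurd hj (by simp)
      · rw [hk] at hj
        have hjk : j = k + 1 := by injection hj with h; exact h.symm
        subst hjk
        have hs' : (PySem.Set.add s x).Nodup := PySem.Set.nodup_add _ _ hs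
        have hcs' : c ∉ PySem.Set.add s x := by
          rw [PySem.Set.mem_add]
          rintro (h | h)
          · exact hcs h
          · exact hxc h.symm
        have := ih (PySem.Set.add s x) k hs' hcs' hk
        rw [List.take_succ_cons, PySem.Set.update_cons, PySem.Set.update_cons]
        exact this

lemma b_eq_rank (string : String) :
    format0_alt string = string.toList.map (rankStr (PySem.Set.ofList string.toList)) := by
  rw [format0_alt]
  apply List.map_congr_left
  intro c hcmem
  rcases hj : PySem.List.index? string.toList c with _ | j
  · exact absurd ((PySem.List.index?_eq_none_iff _ c).mp hj) (by simp [hcmem])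
  · have hkey := key c string.toList [] j (by simp) (by simp) hj
    -- Set.update [] = Set.ofList definitionally (PySem.Set.update_empty is rfl)
    have hkey' : PySem.List.index? (PySem.Set.ofList string.toList) c
        = some ((PySem.Set.ofList (string.toList.take j)).length) := hkey
    rw [rankStr, hkey']
    rfl

-- ===== VERDICT (by name: the statement is the Claim_ definition above) =====
theorem format0_spec : Claim_equal_format0 := by
  intro string _
  unfold Spec_format0
  rw [a_eq_rank, b_eq_rank]
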